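-- pv_equiv track=rewrite | github.com/Lthek55/BackJoon_Algorithm_JS | 프로그래머스/unrated/181890. 왼쪽 오른쪽/왼쪽 오른쪽.py | solution
-- ===== SOURCE A (Python) =====
-- def solution(str_list):
--     if "l" not in str_list and "r" not in str_list:
--         return []
--
--     for idx, v in enumerate(str_list):
--         if v == "l":
--             return str_list[:idx]
--         elif v == "r":
--             return str_list[idx+1:]
-- ===== SOURCE B (Python) =====
-- def solution(str_list):
--     # Single pass that BUILDS the answer element by element with a mode flag:
--     # before any marker, accumulate candidates for the left part; on 'l' return
--     # the accumulator; on 'r' restart the accumulator and collect the tail.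
--     out = []
--     after_r = False
--     for v in str_list:
--         if after_r:
--             out.append(v)
--         elif v == "l":
--             return out
--         elif v == "r":
--             out = []
--             after_r = True
--         else:
--             out.append(v)
--     return out if after_r else []
-- ===== Notes on version B (the rewrite author's own statement) =====
-- stated objective: alternative
-- what changed: Replaces A's find-first-marker-then-slice scan by a one-pass state machine that constructs the output list element by element: it accumulates elements while no marker has been seen, returns the accumulator on 'l', and on 'r' resets it and collects the remaining tail, using no indices, slices or membership pre-check.
import Mathlib
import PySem

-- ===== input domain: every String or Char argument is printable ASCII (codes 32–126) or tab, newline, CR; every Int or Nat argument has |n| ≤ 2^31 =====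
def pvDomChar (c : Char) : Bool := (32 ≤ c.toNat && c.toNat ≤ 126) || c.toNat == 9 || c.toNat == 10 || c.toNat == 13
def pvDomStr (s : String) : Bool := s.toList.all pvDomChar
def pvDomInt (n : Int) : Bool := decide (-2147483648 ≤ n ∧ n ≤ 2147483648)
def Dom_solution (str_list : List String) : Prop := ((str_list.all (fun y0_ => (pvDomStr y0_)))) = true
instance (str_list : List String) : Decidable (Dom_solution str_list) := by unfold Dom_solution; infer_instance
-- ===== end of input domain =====

-- B replaces A's find-first-marker-then-slice scan by a one-pass state machine that builds the output element by element (alternative decomposition, same cost).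

-- ===== PORT A =====
-- A's for-loop over enumerate(str_list): returns on the first "l"/"r", none if the loop ends (unreachable under A's guard).
def solutionGoA (orig : List String) : List (Int × String) → Option (List String)
  | [] => none
  | (idx, v) :: rest =>
    if v = "l" then some (PySem.List.slice orig none (some idx))
    else if v = "r" then some (PySem.List.slice orig (some (idx + 1)) none)
    else solutionGoA orig rest

def solution (str_list : List String) : List String :=
  if "l" ∉ str_list ∧ "r" ∉ str_list then []
  else (solutionGoA str_list (PySem.List.enumerate str_list 0)).getD []

-- ===== PORT B =====
-- Source B's loop: state (out, after_r); early return on "l", reset-and-collect after "r".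
def solutionGoB : List String → List String → Bool → List String
  | [], out, after_r => if after_r then out else []
  | v :: rest, out, after_r =>
    if after_r then solutionGoB rest (out ++ [v]) true
    else if v = "l" then out
    else if v = "r" then solutionGoB rest [] true
    else solutionGoB rest (out ++ [v]) false

def solution_alt (str_list : List String) : List String :=
  solutionGoB str_list [] false

-- ===== PRECONDITION & SPEC =====
def Spec_solution (str_list : List String) (out : List String) : Prop := out = solution_alt str_list
instance (str_list : List String) (out : List String) : Decidable (Spec_solution str_list out) := by unfold Spec_solution; infer_instance

-- ===== CLAIM (what is proved, stated in full; the proofs are below) =====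
def Claim_equal_solution : Prop := ∀ (str_list : List String), Dom_solution str_list → Spec_solution str_list (solution str_list)

-- ===== LEMMAS AND PROOFS =====

-- A's loop characterised by the first positions of "l" and "r" in the remaining suffix.
theorem solutionGoA_char (orig : List String) (xs : List String) (s : Int) :
    solutionGoA orig (PySem.List.enumerate xs s) =
      match PySem.List.index? xs "l", PySem.List.index? xs "r" with
      | none, none => none
      | some i, none => some (PySem.List.slice orig none (some (s + i)))
      | none, some j => some (PySem.List.slice orig (some (s + j + 1)) none)
      | some i, some j =>
        if i < j then some (PySem.List.slice orig none (some (s + i)))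
        else some (PySem.List.slice orig (some (s + j + 1)) none) := by
  induction xs generalizing s with
  | nil => simp [PySem.List.enumerate_nil, solutionGoA, PySem.List.index?]
  | cons x xs ih =>
    rw [PySem.List.enumerate_cons]
    by_cases hl : x = "l"
    · subst hl
      rw [PySem.List.index?_cons_self, PySem.List.index?_cons_of_ne (x := "l") (v := "r") (xs := xs) (by decide)]
      simp only [solutionGoA]
      cases h : PySem.List.index? xs "r" with
      | none => simp
      | some j => simp
    · by_cases hr : x = "r"
      · subst hr
        rw [PySem.List.index?_cons_self, PySem.List.index?_cons_of_ne (x := "r") (v := "l") (xs := xs) (by decide)]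
        simp only [solutionGoA, if_neg (show ¬("r" = "l") by decide)]
        cases h : PySem.List.index? xs "l" with
        | none => simp
        | some i => simp
      · rw [PySem.List.index?_cons_of_ne (x := x) (v := "l") (xs := xs) hl,
            PySem.List.index?_cons_of_ne (x := x) (v := "r") (xs := xs) hr]
        simp only [solutionGoA, if_neg hl, if_neg hr]
        rw [ih (s + 1)]
        cases h1 : PySem.List.index? xs "l" <;> cases h2 : PySem.List.index? xs "r" <;>
          simp [Option.map] <;> ring_nf

-- After "r" the loop just appends the rest of the list.
theorem solutionGoB_after (xs : List String) : ∀ out, solutionGoB xs out true = out ++ xs := by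
  induction xs with
  | nil => intro out; simp [solutionGoB]
  | cons x xs ih => intro out; simp [solutionGoB, ih]

-- B's loop characterised by the first positions of "l" and "r".
theorem solutionGoB_char (xs : List String) : ∀ out, solutionGoB xs out false =
      match PySem.List.index? xs "l", PySem.List.index? xs "r" with
      | none, none => []
      | some i, none => out ++ xs.take i
      | none, some j => xs.drop (j + 1)
      | some i, some j =>
        if i < j then out ++ xs.take i else xs.drop (j + 1) := by
  induction xs with
  | nil => intro out; simp [solutionGoB, PySem.List.index?]
  | cons x xs ih =>
    intro out
    by_cases hl : x = "l"
    · subst hl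
      rw [PySem.List.index?_cons_self, PySem.List.index?_cons_of_ne (x := "l") (v := "r") (xs := xs) (by decide)]
      simp only [solutionGoB, if_neg (Bool.false_ne_true)]
      cases h : PySem.List.index? xs "r" with
      | none => simp
      | some j => simp
    · by_cases hr : x = "r"
      · subst hr
        rw [PySem.List.index?_cons_self, PySem.List.index?_cons_of_ne (x := "r") (v := "l") (xs := xs) (by decide)]
        simp only [solutionGoB, if_neg (Bool.false_ne_true), if_neg (show ¬("r" = "l") by decide)]
        rw [solutionGoB_after]
        cases h : PySem.List.index? xs "l" with
        | none => simp
        | some i => simp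
      · rw [PySem.List.index?_cons_of_ne (x := x) (v := "l") (xs := xs) hl,
            PySem.List.index?_cons_of_ne (x := x) (v := "r") (xs := xs) hr]
        simp only [solutionGoB, if_neg (Bool.false_ne_true), if_neg hl, if_neg hr]
        rw [ih (out ++ [x])]
        cases h1 : PySem.List.index? xs "l" <;> cases h2 : PySem.List.index? xs "r" <;>
          simp [Option.map, List.take_succ_cons, List.drop_succ_cons]

-- ===== VERDICT (by name: the statement is the Claim_ definition above) =====
theorem solution_spec : Claim_equal_solution := by
  intro xs _
  unfold Spec_solution solution solution_alt
  rw [solutionGoA_char xs xs 0, solutionGoB_char xs []]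
  cases h1 : PySem.List.index? xs "l" with
  | none =>
    have hl : "l" ∉ xs := (PySem.List.index?_eq_none_iff xs "l").mp h1
    cases h2 : PySem.List.index? xs "r" with
    | none =>
      have hr : "r" ∉ xs := (PySem.List.index?_eq_none_iff xs "r").mp h2
      simp [hl, hr]
    | some j =>
      have hr : "r" ∈ xs := (PySem.List.index?_isSome_iff xs "r").mp (by rw [h2]; rfl)
      have hc : ((j : Int) + 1) = ((j + 1 : Nat) : Int) := by push_cast; ring
      simp [hl, hr]
      rw [hc, PySem.List.slice_from_natCast]
  | some i =>
    have hml : "l" ∈ xs := (PySem.List.index?_isSome_iff xs "l").mp (by rw [h1]; rfl)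
    have hi0 : (0 : Int) + (i : Int) = ((i : Nat) : Int) := by ring
    cases h2 : PySem.List.index? xs "r" with
    | none =>
      simp [hml, hi0, PySem.List.slice_to_natCast]
    | some j =>
      have hc : ((j : Int) + 1) = ((j + 1 : Nat) : Int) := by push_cast; ring
      by_cases hij : i < j
      · simp [hml, hij, hi0, PySem.List.slice_to_natCast]
      · simp [hml, hij]
        rw [hc, PySem.List.slice_from_natCast]
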